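-- pv_equiv track=rewrite | github.com/ThomasStokes1998/Projects | Speed Solving Analysis/RubiksCube2.py | qtm
-- ===== SOURCE A (Python) =====
-- def qtm(turns: str) -> list:
--     movelist = []
--     m = ""
--     for t in turns:
--         if t == " ":
--             continue
--         if t in ["'", "2"]:
--                 m += t
--         else:
--             if len(m) > 0:
--                 movelist.append(m)
--             m = t
--     movelist.append(m)
--     return movelist
-- ===== SOURCE B (Python) =====
-- def qtm(turns: str) -> list:
--     s = turns.replace(" ", "")
--     if not s:
--         return [""]
--     tokens = []
--     i, n = 0, len(s)
--     while i < n: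
--         # one token: base char at i plus its run of trailing modifiers
--         j = i + 1
--         while j < n and s[j] in "'2":
--             j += 1
--         tokens.append(s[i:j])
--         i = j
--     return tokens
-- ===== Notes on version B (the rewrite author's own statement) =====
-- stated objective: alternative
-- what changed: Replaced the per-character accumulator state machine with a space-stripping pass followed by token-slicing loop that slices off one token (base char plus its modifier run) at a time.
import Mathlib
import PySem

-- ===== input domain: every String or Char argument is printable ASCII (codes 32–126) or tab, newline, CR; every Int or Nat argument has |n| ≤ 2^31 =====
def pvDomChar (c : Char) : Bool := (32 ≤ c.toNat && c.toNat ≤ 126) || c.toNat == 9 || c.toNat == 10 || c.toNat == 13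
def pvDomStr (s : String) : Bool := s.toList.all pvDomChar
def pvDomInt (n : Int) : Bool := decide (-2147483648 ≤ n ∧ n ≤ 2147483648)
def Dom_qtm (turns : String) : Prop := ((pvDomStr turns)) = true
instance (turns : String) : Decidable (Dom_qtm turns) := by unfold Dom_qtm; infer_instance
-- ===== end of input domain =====

-- B replaces A's per-character accumulator state machine with a space-stripping
-- pass followed by a token-slicing loop that cuts off one whole token (base char plus its
-- modifier run) per iteration (alternative, same cost).


-- ===== PORT A =====
-- one step of A's loop body; tokens are built as List Char and turned into String at the end
def qtmStep (st : List (List Char) × List Char) (t : Char) : List (List Char) × List Char :=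
  if t = ' ' then st
  else if t = '\'' ∨ t = '2' then (st.1, st.2 ++ [t])
  else ((if st.2.length > 0 then st.1 ++ [st.2] else st.1), [t])

def qtm (turns : String) : List String :=
  let r := turns.toList.foldl qtmStep ([], [])
  (r.1 ++ [r.2]).map String.ofList

-- ===== PORT B =====
def isMod (c : Char) : Bool := c = '\'' || c = '2'

-- B's outer while loop, one iteration per token, ported as structural recursion on the
-- remaining suffix; the inner while loop that advances j is takeWhile/dropWhile over the tail
def qtmSplit : List Char → List (List Char)
  | [] => []
  | c :: rest =>
    let rest' := rest.dropWhile isMod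
    (c :: rest.takeWhile isMod) ::
      (if rest' = [] then [] else qtmSplit rest')
  termination_by l => l.length
  decreasing_by
    have h := List.length_dropWhile_le (p := isMod) (l := rest)
    simp only [List.length_cons]
    omega

-- turns.replace(" ", "") : exact as a filter, since the pattern is the single char ' '
def qtm_alt (turns : String) : List String :=
  let s := turns.toList.filter (fun c => c ≠ ' ')
  (if s = [] then [[]] else qtmSplit s).map String.ofList

-- ===== PRECONDITION & SPEC =====
def Spec_qtm (turns : String) (out : List String) : Prop := out = qtm_alt turns
instance (turns : String) (out : List String) : Decidable (Spec_qtm turns out) := by unfold Spec_qtm; infer_instance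

-- ===== CLAIM (what is proved, stated in full; the proofs are below) =====
def Claim_equal_qtm : Prop := ∀ (turns : String), Dom_qtm turns → Spec_qtm turns (qtm turns)

-- ===== LEMMAS AND PROOFS =====

-- forward-recursive characterisation of A's fold
def qtmR (m : List Char) : List Char → List (List Char)
  | [] => [m]
  | c :: rest =>
    if isMod c then qtmR (m ++ [c]) rest
    else (if m = [] then [] else [m]) ++ qtmR [c] rest

theorem qtmStep_space (l : List Char) (st : List (List Char) × List Char) :
    l.foldl qtmStep st = (l.filter (fun c => c ≠ ' ')).foldl qtmStep st := by
  induction l generalizing st with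
  | nil => rfl
  | cons c rest ih =>
    by_cases hc : c = ' '
    · subst hc; simpa [qtmStep] using ih st
    · simp [hc, ih]

theorem qtmFold_eq_R (s : List Char) (ml : List (List Char)) (m : List Char)
    (hs : ∀ c ∈ s, c ≠ ' ') :
    (s.foldl qtmStep (ml, m)).1 ++ [(s.foldl qtmStep (ml, m)).2] = ml ++ qtmR m s := by
  induction s generalizing ml m with
  | nil => simp [qtmR]
  | cons c rest ih =>
    have hc : c ≠ ' ' := hs c (by simp)
    have hrest : ∀ c ∈ rest, c ≠ ' ' := fun x hx => hs x (by simp [hx])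
    by_cases hm : isMod c
    · have hm' : c = '\'' ∨ c = '2' := by
        rcases Bool.or_eq_true_iff.mp hm with h | h
        · exact Or.inl (by simpa using h)
        · exact Or.inr (by simpa using h)
      simp [List.foldl_cons, qtmStep, hc, hm', qtmR, hm, ih _ _ hrest]
    · have hm' : ¬ (c = '\'' ∨ c = '2') := by
        rintro (h | h) <;> simp [isMod, h] at hm
      by_cases hmm : m = []
      · subst hmm
        simp [List.foldl_cons, qtmStep, hc, hm', qtmR, hm, ih _ _ hrest]
      · have : m.length > 0 := List.length_pos_iff.mpr hmm
        simp [List.foldl_cons, qtmStep, hc, hm', qtmR, hm, hmm, this, ih _ _ hrest]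

-- the state-machine spec with a non-empty accumulator equals "accumulator ++ modifier run, then the split of the rest"
theorem qtmR_ne (rest : List Char) (m : List Char) (hm : m ≠ []) :
    qtmR m rest =
      (m ++ rest.takeWhile isMod) ::
        (if rest.dropWhile isMod = [] then [] else qtmSplit (rest.dropWhile isMod)) := by
  induction rest generalizing m with
  | nil => simp [qtmR]
  | cons c rest' ih =>
    by_cases hc : isMod c
    · have h1 : m ++ [c] ≠ [] := by simp
      rw [qtmR, if_pos hc, ih _ h1]
      simp [hc]
    · rw [qtmR, if_neg hc, if_neg hm]
      have h2 : qtmR [c] rest' =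
          (([c] : List Char) ++ rest'.takeWhile isMod) ::
            (if rest'.dropWhile isMod = [] then [] else qtmSplit (rest'.dropWhile isMod)) :=
        ih [c] (by simp)
      simp [qtmSplit, hc, h2]

theorem qtmR_nil_eq_split (s : List Char) :
    qtmR [] s = if s = [] then [[]] else qtmSplit s := by
  cases s with
  | nil => simp [qtmR]
  | cons c rest =>
    have h : qtmR ([] : List Char) (c :: rest) = qtmR [c] rest := by
      by_cases hc : isMod c <;> simp [qtmR, hc]
    rw [h, qtmR_ne rest [c] (by simp)]
    simp [qtmSplit]

-- ===== VERDICT (by name: the statement is the Claim_ definition above) =====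
theorem qtm_spec : Claim_equal_qtm := by
  intro turns _
  have hfilt : ∀ c ∈ turns.toList.filter (fun c => c ≠ ' '), c ≠ ' ' := by
    intro c hc
    simpa using (List.of_mem_filter hc)
  have h := qtmFold_eq_R (turns.toList.filter (fun c => c ≠ ' ')) [] [] hfilt
  rw [List.nil_append, qtmR_nil_eq_split] at h
  simp only [Spec_qtm, qtm, qtm_alt]
  rw [qtmStep_space]
  exact congrArg (List.map String.ofList) h
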